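-- pv_equiv track=rewrite | github.com/PEMessage/demo | python3/mfm_encode.py | mfm_encode
-- ===== SOURCE A (Python) =====
-- def mfm_encode(data_bits, prev_bit=0):
--     """
--     Encode bits using MFM encoding
--     Args:
--         data_bits: List of bits to encode
--         prev_bit: The last bit of previous data (default 0)
--     Returns:
--         List of encoded bits
--     """
--     encoded_bits = [prev_bit]
--
--     for current_bit in data_bits:
--         if current_bit == 1:
--             if encoded_bits[-1] == 0:
--                 # '1' is always encoded as 01
--                 encoded_bits.extend([1, 0])
--             else:
--                 encoded_bits.extend([0, 1])
--         else:
--             # '0' depends on previous bit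
--             if encoded_bits[-1] == 0:
--                 encoded_bits.extend([1, 1])  # 0 after 0 -> 11
--             else:
--                 encoded_bits.extend([0, 0])  # 0 after 1 -> 00
--
--         prev_bit = current_bit
--
--     return encoded_bits[1:]  # remove prev_bit
-- ===== SOURCE B (Python) =====
-- def mfm_encode(data_bits, prev_bit=0):
--     # Pass 1: precompute the encoder state (last emitted/previous bit, 0 or 1)
--     # in force before each data bit: any bit other than 1 flips the state.
--     t = 0 if prev_bit == 0 else 1
--     states = []
--     for b in data_bits:
--         states.append(t)
--         if b != 1:
--             t = 1 - t
--     # Pass 2: emit the two output bits per (bit, state), flattened.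
--     return [x for b, s in zip(data_bits, states)
--               for x in ((1 - s, s) if b == 1 else (1 - s, 1 - s))]
-- ===== Notes on version B (the rewrite author's own statement) =====
-- stated objective: alternative
-- what changed: Replaces A's single loop that appends to the output and reads its own last element back via encoded_bits[-1] with two separate passes: a first pass precomputes the encoder-state table (state flips on every non-1 bit), a second pass maps each (bit, state) pair to its two output bits and flattens.
import Mathlib
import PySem

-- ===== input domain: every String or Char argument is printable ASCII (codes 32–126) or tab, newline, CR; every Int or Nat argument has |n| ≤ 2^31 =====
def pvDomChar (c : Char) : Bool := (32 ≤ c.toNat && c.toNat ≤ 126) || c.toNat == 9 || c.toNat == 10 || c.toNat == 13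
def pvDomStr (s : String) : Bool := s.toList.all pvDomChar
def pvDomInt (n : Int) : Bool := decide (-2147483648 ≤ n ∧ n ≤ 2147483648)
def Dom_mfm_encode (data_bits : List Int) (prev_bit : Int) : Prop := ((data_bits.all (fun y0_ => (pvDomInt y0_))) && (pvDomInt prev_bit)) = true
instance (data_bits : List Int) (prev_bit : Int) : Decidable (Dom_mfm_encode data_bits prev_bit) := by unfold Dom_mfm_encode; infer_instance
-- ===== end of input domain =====

-- B replaces A's append-and-read-back loop by a state table pass plus an emission pass (alternative decomposition, same cost).

-- ===== PORT A =====
-- one loop iteration: reads encoded_bits[-1] back from the list being built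
-- (the list is always nonempty, so Python's encoded_bits[-1] never raises; .getD 0 is never used)
def mfmStepA (acc : List Int) (current_bit : Int) : List Int :=
  if current_bit == 1 then
    if (PySem.List.pyGet? acc (-1)).getD 0 == 0 then acc ++ [1, 0] else acc ++ [0, 1]
  else
    if (PySem.List.pyGet? acc (-1)).getD 0 == 0 then acc ++ [1, 1] else acc ++ [0, 0]

def mfm_encode (data_bits : List Int) (prev_bit : Int) : List Int :=
  PySem.List.slice (data_bits.foldl mfmStepA [prev_bit]) (some 1) none  -- encoded_bits[1:]

-- ===== PORT B =====
-- pass 1: the encoder state (0 or 1) before each data bit; a non-1 bit flips it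
def mfmStates : List Int → Int → List Int
  | [], _ => []
  | b :: rest, t => t :: mfmStates rest (if b ≠ 1 then 1 - t else t)

def mfm_encode_alt (data_bits : List Int) (prev_bit : Int) : List Int :=
  let t0 : Int := if prev_bit == 0 then 0 else 1
  -- pass 2: flatten the two output bits of each (bit, state) pair
  (data_bits.zip (mfmStates data_bits t0)).flatMap
    (fun p => if p.1 == 1 then [1 - p.2, p.2] else [1 - p.2, 1 - p.2])

-- ===== PRECONDITION & SPEC =====
def Spec_mfm_encode (data_bits : List Int) (prev_bit : Int) (out : List Int) : Prop := out = mfm_encode_alt data_bits prev_bit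
instance (data_bits : List Int) (prev_bit : Int) (out : List Int) : Decidable (Spec_mfm_encode data_bits prev_bit out) := by unfold Spec_mfm_encode; infer_instance

-- ===== CLAIM (what is proved, stated in full; the proofs are below) =====
def Claim_equal_mfm_encode : Prop := ∀ (data_bits : List Int) (prev_bit : Int), Dom_mfm_encode data_bits prev_bit → Spec_mfm_encode data_bits prev_bit (mfm_encode data_bits prev_bit)

-- ===== LEMMAS AND PROOFS =====

-- common reference: emit the output while threading the state
def pvEmit : List Int → Int → List Int
  | [], _ => []
  | b :: rest, t =>
      (if b == 1 then [1 - t, t] else [1 - t, 1 - t]) ++ pvEmit rest (if b == 1 then t else 1 - t)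

theorem pvEmit_eq_alt : ∀ (bits : List Int) (t : Int),
    (bits.zip (mfmStates bits t)).flatMap
      (fun p => if p.1 == 1 then [1 - p.2, p.2] else [1 - p.2, 1 - p.2]) = pvEmit bits t := by
  intro bits
  induction bits with
  | nil => intro t; rfl
  | cons b rest ih =>
      intro t
      rw [mfmStates, List.zip_cons_cons, List.flatMap_cons, ih]
      by_cases hb : b = 1 <;> simp [pvEmit, hb, sub_sub_cancel]

theorem pvLoopA : ∀ (bits : List Int) (acc : List Int) (l : Int),
    List.foldl mfmStepA (acc ++ [l]) bits
      = acc ++ [l] ++ pvEmit bits (if l == 0 then 0 else 1) := by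
  intro bits
  induction bits with
  | nil => intro acc l; simp [pvEmit]
  | cons b rest ih =>
      intro acc l
      have hlast : PySem.List.pyGet? (acc ++ [l]) (-1) = some l := by
        simp [PySem.List.pyGet?_neg_one]
      simp only [List.foldl_cons, mfmStepA, hlast, Option.getD_some]
      by_cases hb : b = 1 <;> by_cases hl : l = 0
      · rw [if_pos (by simp [hb]), if_pos (by simp [hl]),
          show acc ++ [l] ++ [(1:Int), 0] = (acc ++ [l] ++ [1]) ++ [(0:Int)] by simp, ih]
        simp [pvEmit, hb, hl]
      · rw [if_pos (by simp [hb]), if_neg (by simp [hl]),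
          show acc ++ [l] ++ [(0:Int), 1] = (acc ++ [l] ++ [0]) ++ [(1:Int)] by simp, ih]
        simp [pvEmit, hb, hl]
      · rw [if_neg (by simp [hb]), if_pos (by simp [hl]),
          show acc ++ [l] ++ [(1:Int), 1] = (acc ++ [l] ++ [1]) ++ [(1:Int)] by simp, ih]
        simp [pvEmit, hb, hl]
      · rw [if_neg (by simp [hb]), if_neg (by simp [hl]),
          show acc ++ [l] ++ [(0:Int), 0] = (acc ++ [l] ++ [0]) ++ [(0:Int)] by simp, ih]
        simp [pvEmit, hb, hl]

-- ===== VERDICT (by name: the statement is the Claim_ definition above) =====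
theorem mfm_encode_spec : Claim_equal_mfm_encode := by
  intro data_bits prev_bit _
  unfold Spec_mfm_encode mfm_encode mfm_encode_alt
  have := pvLoopA data_bits [] prev_bit
  simp only [List.nil_append] at this
  rw [this, pvEmit_eq_alt, PySem.List.slice_from_one]
  simp
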